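-- pv_equiv track=rewrite | github.com/daniel-reich/ubiquitous-fiesta | kS8tfJD2ggohQbWx7_2.py | last_name_lensort
-- ===== SOURCE A (Python) =====
-- def last_name_lensort(names):
--   def name_formatter(names):
--     tr = {}
--     for name in names:
--       first, last = name.split()
--       tr[last] = name
--     return tr
--   def length_sorter(last_names):
--     tr = {}
--     for name in last_names:
--       if len(name) not in tr.keys():
--         tr[len(name)] = [name]
--       else:
--         tr[len(name)].append(name)
--     return tr
--
--   nf = name_formatter(names)
--   ls = length_sorter(list(nf.keys()))
--
--   tr = []
--
--   for length in sorted(list(ls.keys())):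
--     if len(ls[length]) > 1:
--       nl = sorted(ls[length])
--     else:
--       nl = ls[length]
--
--     for item in nl:
--       tr.append(nf[item])
--
--   return tr
-- ===== SOURCE B (Python) =====
-- def last_name_lensort(names):
--     nf = {}
--     for name in names:
--         first, last = name.split()
--         nf[last] = name
--     return [nf[last] for last in sorted(nf, key=lambda k: (len(k), k))]
-- ===== Notes on version B (the rewrite author's own statement) =====
-- stated objective: simpler
-- what changed: Replaces the intermediate length-bucket dict and the per-bucket sorts with one sorted pass over the last-name dict's keys using the composite key (len(last), last).
import Mathlib
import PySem

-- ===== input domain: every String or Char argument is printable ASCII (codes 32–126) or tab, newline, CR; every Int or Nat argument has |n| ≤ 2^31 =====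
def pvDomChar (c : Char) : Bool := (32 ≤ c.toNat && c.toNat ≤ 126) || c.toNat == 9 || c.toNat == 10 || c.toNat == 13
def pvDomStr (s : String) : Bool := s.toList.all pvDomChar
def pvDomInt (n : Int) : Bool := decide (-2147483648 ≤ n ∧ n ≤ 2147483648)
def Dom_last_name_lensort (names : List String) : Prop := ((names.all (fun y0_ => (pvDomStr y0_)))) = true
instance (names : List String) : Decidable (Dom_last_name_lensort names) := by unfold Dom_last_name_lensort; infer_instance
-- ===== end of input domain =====

-- B replaces A's intermediate length-bucket dict and the per-bucket sorts by one sorted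
-- pass over the last-name dict's keys with the composite key (len(last), last).


-- ===== PORT A =====
-- helper name_formatter: 'first, last = name.split(); tr[last] = name'.
-- On a name whose split is not exactly two words Python raises ValueError; Pre_
-- excludes those inputs, the port skips such a name.
def pvNameFormatter (names : List String) : PySem.Dict String String :=
  names.foldl (fun tr name =>
    match PySem.Str.split₀ name with
    | [_, last] => tr.insert last name
    | _ => tr) PySem.Dict.empty

-- helper length_sorter: group last names by length, in insertion order
def pvLengthSorter (last_names : List String) : PySem.Dict Int (List String) :=
  last_names.foldl (fun tr name =>
    if ¬ (tr.contains (PySem.Str.len name) = true) then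
      tr.insert (PySem.Str.len name) [name]
    else
      tr.modify (PySem.Str.len name) [] (fun l => l ++ [name])) PySem.Dict.empty

def last_name_lensort (names : List String) : List String :=
  let nf := pvNameFormatter names
  let ls := pvLengthSorter nf.keys
  (PySem.List.sorted ls.keys (fun x => x)).foldl (fun tr length =>
    let nl := if (ls.getD length []).length > 1
              then PySem.List.sorted (ls.getD length []) (fun x => x)
              else ls.getD length []
    nl.foldl (fun tr item => tr ++ [nf.getD item ""]) tr) []

-- ===== PORT B =====
def last_name_lensort_alt (names : List String) : List String :=
  let nf := names.foldl (fun nf name =>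
    match PySem.Str.split₀ name with
    | [_, last] => nf.insert last name
    | _ => nf) PySem.Dict.empty
  (PySem.List.sorted2 nf.keys PySem.Str.len (fun k => k)).map (fun last => nf.getD last "")

-- ===== PRECONDITION & SPEC =====
-- Pre_ excludes exactly the inputs containing a name that does not split into exactly
-- two whitespace-separated words: there Python A raises ValueError (B raises too).
def Pre_last_name_lensort (names : List String) : Prop :=
  ∀ name ∈ names, (PySem.Str.split₀ name).length = 2
instance (names : List String) : Decidable (Pre_last_name_lensort names) := by
  unfold Pre_last_name_lensort; infer_instance

def pvWitness_last_name_lensort : List String := ["Ann Poe", "Bob Li", "Cy Poe"]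

def Spec_last_name_lensort (names : List String) (out : List String) : Prop := out = last_name_lensort_alt names
instance (names : List String) (out : List String) : Decidable (Spec_last_name_lensort names out) := by unfold Spec_last_name_lensort; infer_instance

-- ===== CLAIM (what is proved, stated in full; the proofs are below) =====
def Claim_equal_last_name_lensort : Prop := ∀ (names : List String), Dom_last_name_lensort names → Pre_last_name_lensort names → Spec_last_name_lensort names (last_name_lensort names)

-- ===== LEMMAS AND PROOFS =====

lemma pv_sorted2_eq_sorted_lex (xs : List String) :
    PySem.List.sorted2 xs PySem.Str.len (fun k => k)
      = PySem.List.sorted xs (fun x => toLex (PySem.Str.len x, x)) := by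
  unfold PySem.List.sorted2 PySem.List.sorted
  have h : (fun a b : String => decide (PySem.Str.len a < PySem.Str.len b) ||
        (!decide (PySem.Str.len b < PySem.Str.len a) && decide (a < b)))
      = (fun a b : String => decide (toLex (PySem.Str.len a, a) < toLex (PySem.Str.len b, b))) := by
    funext a b
    rw [Bool.eq_iff_iff]
    simp only [Bool.or_eq_true, Bool.and_eq_true, Bool.not_eq_true',
      decide_eq_true_eq, decide_eq_false_iff_not, Prod.Lex.lt_iff]
    simp only [ofLex_toLex, PySem.Str.len_eq, not_lt, Nat.cast_lt, Nat.cast_inj]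
    constructor
    · rintro (h | ⟨h, h2⟩)
      · exact Or.inl h
      · rcases Nat.lt_or_ge a.toList.length b.toList.length with h' | h'
        · exact Or.inl h'
        · exact Or.inr ⟨by omega, h2⟩
    · rintro (h | ⟨h, h2⟩)
      · exact Or.inl h
      · exact Or.inr ⟨by omega, h2⟩
  exact congrArg (fun f => List.foldl (fun acc x => PySem.List.insertBy f x acc) [] xs) h

lemma pv_branch_eq (b : List String) :
    (if b.length > 1 then PySem.List.sorted b (fun x => x) else b)
      = PySem.List.sorted b (fun x => x) := by
  match b with
  | [] => rfl
  | [x] => rfl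
  | x :: y :: t => simp

lemma pv_group_step (K : List String) (x : String) :
    pvLengthSorter (K ++ [x]) =
      (if ¬ ((pvLengthSorter K).contains (PySem.Str.len x) = true) then
        (pvLengthSorter K).insert (PySem.Str.len x) [x]
      else
        (pvLengthSorter K).modify (PySem.Str.len x) [] (fun l => l ++ [x])) := by
  simp [pvLengthSorter, List.foldl_append]

lemma pv_group_keys (K : List String) :
    (pvLengthSorter K).keys = PySem.Set.ofList (K.map PySem.Str.len) := by
  induction K using List.reverseRecOn with
  | nil => rfl
  | append_singleton K x ih =>
    rw [pv_group_step]
    rw [List.map_append, List.map_singleton, PySem.Set.ofList_append_singleton]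
    by_cases hc : (pvLengthSorter K).contains (PySem.Str.len x) = true
    · rw [if_neg (not_not_intro hc)]
      rw [PySem.Dict.keys_modify, PySem.Dict.keys_insert_of_contains _ _ hc, ih,
        PySem.Set.add_of_mem]
      rw [← ih]
      exact (PySem.Dict.contains_iff_mem_keys _ _).mp hc
    · rw [if_pos hc]
      rw [PySem.Dict.keys_insert_of_not_contains _ _ (Bool.eq_false_iff.mpr hc), ih,
        PySem.Set.add_of_not_mem]
      rw [← ih]
      intro hmem
      exact hc ((PySem.Dict.contains_iff_mem_keys _ _).mpr (ih ▸ hmem))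

lemma pv_group_getD (K : List String) (ℓ : Int) :
    (pvLengthSorter K).getD ℓ [] = K.filter (fun n => PySem.Str.len n == ℓ) := by
  induction K using List.reverseRecOn with
  | nil => rfl
  | append_singleton K x ih =>
    rw [pv_group_step, List.filter_append]
    by_cases he : PySem.Str.len x = ℓ
    · subst he
      rw [show List.filter (fun n => PySem.Str.len n == PySem.Str.len x) [x] = [x] by
        simp]
      by_cases hc : (pvLengthSorter K).contains (PySem.Str.len x) = true
      · rw [if_neg (not_not_intro hc), PySem.Dict.getD_modify_self, ih]
      · rw [if_pos hc, PySem.Dict.getD_insert_self]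
        have hnotmem : PySem.Str.len x ∉ K.map PySem.Str.len := by
          intro hmem
          apply hc
          rw [PySem.Dict.contains_iff_mem_keys, pv_group_keys]
          exact (PySem.Set.mem_ofList _ _).mpr hmem
        have hnil : K.filter (fun n => PySem.Str.len n == PySem.Str.len x) = [] := by
          apply List.filter_eq_nil_iff.mpr
          intro n hn
          simp only [beq_iff_eq]
          exact fun h => hnotmem (h ▸ List.mem_map_of_mem hn)
        rw [hnil, List.nil_append]
    · have hb : (PySem.Str.len x == ℓ) = false := beq_eq_false_iff_ne.mpr he
      rw [show List.filter (fun n => PySem.Str.len n == ℓ) [x] = [] by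
        simp only [List.filter_cons, List.filter_nil, hb, Bool.false_eq_true, if_false]]
      rw [List.append_nil]
      by_cases hc : (pvLengthSorter K).contains (PySem.Str.len x) = true
      · rw [if_neg (not_not_intro hc),
          PySem.Dict.getD_modify_of_ne _ _ _ (fun h => absurd h.symm he), ih]
      · rw [if_pos hc,
          PySem.Dict.getD_insert_of_ne _ _ _ (fun h => absurd h.symm he), ih]

lemma pv_nf_keys_nodup (names : List String) : (pvNameFormatter names).keys.Nodup := by
  induction names using List.reverseRecOn with
  | nil => simp [pvNameFormatter, PySem.Dict.keys_empty]
  | append_singleton K x ih =>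
    have hstep : pvNameFormatter (K ++ [x]) =
        (match PySem.Str.split₀ x with
         | [_, last] => (pvNameFormatter K).insert last x
         | _ => pvNameFormatter K) := by
      simp [pvNameFormatter, List.foldl_append]
    rw [hstep]
    match PySem.Str.split₀ x with
    | [] => exact ih
    | [a] => exact ih
    | [a, b] => exact PySem.Dict.nodup_keys_insert _ _ _ ih
    | a :: b :: c :: t => exact ih

lemma pv_flatMap_filter_perm (ℓs : List Int) (K : List String)
    (hnd : ℓs.Nodup) (hall : ∀ n ∈ K, PySem.Str.len n ∈ ℓs) :
    (ℓs.flatMap (fun ℓ => K.filter (fun n => PySem.Str.len n == ℓ))).Perm K := by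
  induction ℓs generalizing K with
  | nil =>
    have : K = [] := by
      cases K with
      | nil => rfl
      | cons a t => exact absurd (hall a (List.mem_cons_self)) (List.not_mem_nil)
    simp [this]
  | cons ℓ t ih =>
    rw [List.flatMap_cons]
    have hsub : ∀ ℓ' ∈ t, K.filter (fun n => PySem.Str.len n == ℓ') =
        (K.filter (fun n => !(PySem.Str.len n == ℓ))).filter (fun n => PySem.Str.len n == ℓ') := by
      intro ℓ' hℓ'
      rw [List.filter_filter]
      apply List.filter_congr
      intro n hn
      have hne : ℓ' ≠ ℓ := by
        rintro rfl
        exact (List.nodup_cons.mp hnd).1 hℓ'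
      rw [Bool.eq_iff_iff]
      simp only [beq_iff_eq, Bool.and_eq_true, Bool.not_eq_true', beq_eq_false_iff_ne,
        PySem.Str.len_eq, ne_eq]
      omega
    have hmapeq : t.flatMap (fun ℓ' => K.filter (fun n => PySem.Str.len n == ℓ')) =
        t.flatMap (fun ℓ' => (K.filter (fun n => !(PySem.Str.len n == ℓ))).filter
          (fun n => PySem.Str.len n == ℓ')) := by
      exact List.flatMap_congr hsub
    rw [hmapeq]
    have hperm := ih (K.filter (fun n => !(PySem.Str.len n == ℓ))) (List.nodup_cons.mp hnd).2
      (by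
        intro n hn
        rcases List.mem_filter.mp hn with ⟨hnK, hnb⟩
        rcases hall n hnK with hmem
        rcases List.mem_cons.mp hmem with h | h
        · exact absurd (beq_iff_eq.mpr h) (by simpa using hnb)
        · exact h)
    exact List.Perm.trans (List.Perm.append_left _ hperm) (List.filter_append_perm _ K)

lemma pv_keylist_eq (K : List String) (hnd : K.Nodup) :
    PySem.List.sorted2 K PySem.Str.len (fun k => k)
      = (PySem.List.sorted (pvLengthSorter K).keys (fun x => x)).flatMap
          (fun ℓ => PySem.List.sorted ((pvLengthSorter K).getD ℓ []) (fun x => x)) := by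
  rw [pv_sorted2_eq_sorted_lex]
  have hgk := pv_group_keys K
  -- the sorted distinct lengths
  have hkeys_nodup : (pvLengthSorter K).keys.Nodup := by
    rw [hgk]; exact PySem.Set.nodup_ofList _
  have hlens_nodup : (PySem.List.sorted (pvLengthSorter K).keys (fun x : Int => x)).Nodup :=
    (PySem.List.sorted_perm (pvLengthSorter K).keys (fun x : Int => x) false).symm.nodup hkeys_nodup
  have hlens_lt : (PySem.List.sorted (pvLengthSorter K).keys (fun x => x)).Pairwise (· < ·) := by
    rw [hgk]; exact PySem.List.sorted_ofList_pairwise_lt _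
  have hlens_mem : ∀ n ∈ K, PySem.Str.len n ∈
      PySem.List.sorted (pvLengthSorter K).keys (fun x => x) := by
    intro n hn
    rw [PySem.List.mem_sorted, hgk, PySem.Set.mem_ofList]
    exact List.mem_map_of_mem hn
  apply PySem.List.sorted_eq_of_perm_of_pairwise_lt
  · -- permutation
    refine List.Perm.trans (List.Perm.flatMap_left _ (fun ℓ _ => ?_))
      (?_ : (_root_.List.flatMap (fun ℓ => K.filter (fun n => PySem.Str.len n == ℓ)) _).Perm K)
    · rw [pv_group_getD]; exact PySem.List.sorted_perm _ _ _
    · exact pv_flatMap_filter_perm _ K hlens_nodup hlens_mem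
  · -- pairwise strict lex
    rw [List.flatMap_def, List.pairwise_flatten]
    constructor
    · -- within each sorted bucket: strictly increasing lex (equal lengths, nodup, sorted)
      intro s hs
      rcases List.mem_map.mp hs with ⟨ℓ, hℓ, rfl⟩
      have hble : (PySem.List.sorted ((pvLengthSorter K).getD ℓ []) (fun x => x)).Pairwise
          (fun a b => (fun x : String => x) a ≤ (fun x : String => x) b) :=
        PySem.List.sorted_pairwise _ _
      have hbnd : (PySem.List.sorted ((pvLengthSorter K).getD ℓ []) (fun x => x)).Nodup := by
        refine (PySem.List.sorted_perm _ _ false).symm.nodup ?_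
        rw [pv_group_getD]
        exact hnd.filter _
      have := List.Pairwise.and hble hbnd
      refine this.imp_of_mem ?_
      intro a b ha hb hab
      have hla : PySem.Str.len a = ℓ := by
        have := (PySem.List.mem_sorted _ _ _ _).mp ha
        rw [pv_group_getD] at this
        simpa using (List.mem_filter.mp this).2
      have hlb : PySem.Str.len b = ℓ := by
        have := (PySem.List.mem_sorted _ _ _ _).mp hb
        rw [pv_group_getD] at this
        simpa using (List.mem_filter.mp this).2
      rw [Prod.Lex.lt_iff]; simp only [ofLex_toLex]
      exact Or.inr ⟨by rw [hla, hlb], lt_of_le_of_ne hab.1 hab.2⟩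
    · -- across buckets: lengths strictly increase
      rw [List.pairwise_map]
      refine hlens_lt.imp_of_mem ?_
      intro ℓ1 ℓ2 h1 h2 hlt x hx y hy
      have hlx : PySem.Str.len x = ℓ1 := by
        have := (PySem.List.mem_sorted _ _ _ _).mp hx
        rw [pv_group_getD] at this
        simpa using (List.mem_filter.mp this).2
      have hly : PySem.Str.len y = ℓ2 := by
        have := (PySem.List.mem_sorted _ _ _ _).mp hy
        rw [pv_group_getD] at this
        simpa using (List.mem_filter.mp this).2
      rw [Prod.Lex.lt_iff]; simp only [ofLex_toLex]
      exact Or.inl (by rw [hlx, hly]; exact hlt)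

theorem pv_main (names : List String) : last_name_lensort names = last_name_lensort_alt names := by
  have hbody : (fun (tr : List String) (length : Int) =>
        (let nl := if ((pvLengthSorter (pvNameFormatter names).keys).getD length []).length > 1
              then PySem.List.sorted ((pvLengthSorter (pvNameFormatter names).keys).getD length []) (fun x => x)
              else (pvLengthSorter (pvNameFormatter names).keys).getD length []
         nl.foldl (fun tr item => tr ++ [(pvNameFormatter names).getD item ""]) tr))
      = (fun (tr : List String) (length : Int) =>
          tr ++ (PySem.List.sorted ((pvLengthSorter (pvNameFormatter names).keys).getD length [])
            (fun x => x)).map (fun item => (pvNameFormatter names).getD item "")) := by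
    funext tr length
    show (if ((pvLengthSorter (pvNameFormatter names).keys).getD length []).length > 1
              then PySem.List.sorted ((pvLengthSorter (pvNameFormatter names).keys).getD length []) (fun x => x)
              else (pvLengthSorter (pvNameFormatter names).keys).getD length []).foldl
            (fun tr item => tr ++ [(pvNameFormatter names).getD item ""]) tr = _
    rw [pv_branch_eq]
    exact PySem.List.foldl_append_singleton_eq_map _ _ tr
  show (PySem.List.sorted (pvLengthSorter (pvNameFormatter names).keys).keys (fun x => x)).foldl _ [] = _
  rw [hbody, PySem.List.foldl_append_eq_flatMap, List.nil_append, ← List.map_flatMap,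
    ← pv_keylist_eq _ (pv_nf_keys_nodup names)]
  rfl

-- ===== VERDICT (by name: the statement is the Claim_ definition above) =====
theorem last_name_lensort_spec : Claim_equal_last_name_lensort := by
  intro names _ _
  exact pv_main names
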